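-- pv_equiv track=rewrite | github.com/groszewa/AdventOfCode2024 | day2/problem1/main.py | level_check
-- ===== SOURCE A (Python) =====
-- def level_check(l):
--     diff_list = []
--     for x,y in zip(l[0::],l[1::]):
--         diff_list.append(y-x)
--     if all((x>0 and x<4) for x in diff_list):
--         return True
--     if all((x<0 and x>-4) for x in diff_list):
--         return True
--     return False
-- ===== SOURCE B (Python) =====
-- def level_check(l):
--     if len(l) < 2:
--         return True
--     d0 = l[1] - l[0]
--     if d0 == 0:
--         return False
--     s = 1 if d0 > 0 else -1
--
--     def go(i):
--         if i + 1 >= len(l):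
--             return True
--         return 1 <= s * (l[i + 1] - l[i]) <= 3 and go(i + 1)
--
--     return go(0)
-- ===== Notes on version B (the rewrite author's own statement) =====
-- stated objective: alternative
-- what changed: Instead of building a diff list and running two independent all() scans (one per direction), B decides the direction once from the sign of the first difference and then makes a single recursive scan with one sign-adjusted predicate 1 <= s*(y-x) <= 3, short-circuiting on the first bad step.
import Mathlib
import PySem

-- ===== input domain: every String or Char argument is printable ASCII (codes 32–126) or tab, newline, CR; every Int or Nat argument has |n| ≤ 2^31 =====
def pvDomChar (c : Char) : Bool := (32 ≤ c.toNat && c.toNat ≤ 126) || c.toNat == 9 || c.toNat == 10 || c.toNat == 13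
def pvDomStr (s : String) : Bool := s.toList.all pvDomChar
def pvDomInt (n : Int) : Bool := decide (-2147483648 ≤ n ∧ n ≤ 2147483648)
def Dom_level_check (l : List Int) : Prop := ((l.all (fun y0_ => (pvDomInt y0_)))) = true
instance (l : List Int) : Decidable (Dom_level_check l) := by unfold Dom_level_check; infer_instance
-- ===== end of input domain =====

-- B decides the direction once from the sign of the first difference and makes a single
-- short-circuiting recursive scan with one sign-adjusted predicate (objective: alternative).

-- ===== PORT A =====
-- diff_list built by appending y-x for each zipped pair, then two all() scans in order.
def level_check (l : List Int) : Bool :=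
  let diff_list := (List.zip l (l.drop 1)).foldl (fun acc (p : Int × Int) => acc ++ [p.2 - p.1]) []
  if diff_list.all (fun x => decide (x > 0) && decide (x < 4)) then true
  else if diff_list.all (fun x => decide (x < 0) && decide (x > (-4 : Int))) then true
  else false

-- ===== PORT B =====
-- go s walks the list checking 1 <= s*(y-x) <= 3 for each consecutive pair, short-circuiting.
def level_check_go (s : Int) : List Int → Bool
  | x :: y :: rest => decide (1 ≤ s * (y - x)) && (decide (s * (y - x) ≤ 3) && level_check_go s (y :: rest))
  | _ => true

def level_check_alt (l : List Int) : Bool :=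
  match l with
  | x :: y :: _ =>
      let d0 := y - x
      if d0 = 0 then false
      else level_check_go (if d0 > 0 then 1 else -1) l
  | _ => true

-- ===== PRECONDITION & SPEC =====
def Spec_level_check (l : List Int) (out : Bool) : Prop := out = level_check_alt l
instance (l : List Int) (out : Bool) : Decidable (Spec_level_check l out) := by unfold Spec_level_check; infer_instance

-- ===== CLAIM (what is proved, stated in full; the proofs are below) =====
def Claim_equal_level_check : Prop := ∀ (l : List Int), Dom_level_check l → Spec_level_check l (level_check l)

-- ===== LEMMAS AND PROOFS =====

theorem pv_foldl_append (zs : List (Int × Int)) (acc : List Int) :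
    zs.foldl (fun acc (p : Int × Int) => acc ++ [p.2 - p.1]) acc
      = acc ++ zs.map (fun p => p.2 - p.1) := by
  induction zs generalizing acc with
  | nil => simp
  | cons z zs ih => simp [List.foldl, ih]

theorem pv_all_congr {A : Type} (zs : List A) (p q : A → Bool) (h : ∀ a ∈ zs, p a = q a) :
    zs.all p = zs.all q := by
  induction zs with
  | nil => rfl
  | cons z zs ih =>
      simp only [List.all_cons, h z (List.mem_cons_self), ih (fun a ha => h a (List.mem_cons_of_mem _ ha))]

theorem pv_ite_or (a b : Bool) :
    (if a then true else if b then true else false) = (a || b) := by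
  cases a <;> cases b <;> rfl

-- A's result as two all-scans over the consecutive pairs.
theorem pv_A_eq (l : List Int) :
    level_check l
      = ((List.zip l (l.drop 1)).all (fun p => decide (p.2 - p.1 > 0) && decide (p.2 - p.1 < 4))
        || (List.zip l (l.drop 1)).all (fun p => decide (p.2 - p.1 < 0) && decide (p.2 - p.1 > (-4:Int)))) := by
  unfold level_check
  rw [pv_foldl_append]
  simp only [List.nil_append, List.all_map, Function.comp_def, pv_ite_or]

-- B's go as an all-scan over the consecutive pairs.
theorem pv_go_eq (s : Int) (l : List Int) :
    level_check_go s l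
      = (List.zip l (l.drop 1)).all
          (fun p => decide (1 ≤ s * (p.2 - p.1)) && decide (s * (p.2 - p.1) ≤ 3)) := by
  induction l with
  | nil => rfl
  | cons x t ih =>
      cases t with
      | nil => rfl
      | cons y rest =>
          simp [level_check_go, ih, Bool.and_assoc]

-- ===== VERDICT (by name: the statement is the Claim_ definition above) =====
theorem level_check_spec : Claim_equal_level_check := by
  intro l _
  unfold Spec_level_check
  rw [pv_A_eq]
  match l with
  | [] => rfl
  | [x] => rfl
  | x :: y :: rest =>
      unfold level_check_alt
      simp only [List.drop_succ_cons, List.drop_zero, List.zip_cons_cons, List.all_cons]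
      by_cases h0 : y - x = 0
      · -- first diff zero: both all-scans fail on the head pair
        rw [if_pos h0, h0]
        simp
      · rw [if_neg h0, pv_go_eq]
        simp only [List.drop_succ_cons, List.drop_zero, List.zip_cons_cons, List.all_cons]
        by_cases hp : y - x > 0
        · rw [if_pos hp]
          have hdec : decide (y - x < 0) = false := by simp; omega
          rw [hdec, Bool.false_and, Bool.false_and, Bool.or_false]
          have hpred : (decide (y - x > 0) && decide (y - x < 4))
              = (decide (1 ≤ 1 * (y - x)) && decide (1 * (y - x) ≤ 3)) := by
            simp only [one_mul, ← Bool.decide_and, decide_eq_decide]; omega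
          rw [hpred]
          have hall := pv_all_congr ((y :: rest).zip rest)
            (fun p : Int × Int => decide (p.2 - p.1 > 0) && decide (p.2 - p.1 < 4))
            (fun p : Int × Int => decide (1 ≤ 1 * (p.2 - p.1)) && decide (1 * (p.2 - p.1) ≤ 3))
            (fun p _ => by simp only [one_mul, ← Bool.decide_and, decide_eq_decide]; omega)
          rw [hall]
        · rw [if_neg hp]
          have hinc : decide (y - x > 0) = false := by simp; omega
          rw [hinc, Bool.false_and, Bool.false_and, Bool.false_or]
          have hpred : (decide (y - x < 0) && decide (y - x > (-4:Int)))
              = (decide (1 ≤ (-1) * (y - x)) && decide ((-1) * (y - x) ≤ 3)) := by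
            simp only [neg_one_mul, ← Bool.decide_and, decide_eq_decide]; omega
          rw [hpred]
          have hall := pv_all_congr ((y :: rest).zip rest)
            (fun p : Int × Int => decide (p.2 - p.1 < 0) && decide (p.2 - p.1 > (-4:Int)))
            (fun p : Int × Int => decide (1 ≤ (-1) * (p.2 - p.1)) && decide ((-1) * (p.2 - p.1) ≤ 3))
            (fun p _ => by simp only [neg_one_mul, ← Bool.decide_and, decide_eq_decide]; omega)
          rw [hall]
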